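-- pv_equiv track=rewrite | github.com/Punpuntripping/LUNA-AI | agents/deep_search_v3/aggregator/log_parser.py | _join_paragraphs
-- ===== SOURCE A (Python) =====
-- def _join_paragraphs(lines: list[str]) -> str:
--     """Join a list of '> ...' blockquote lines, preserving paragraph breaks.
--
--     Blank lines in the source (i.e. the stripped line is empty) become paragraph
--     breaks in the output. Consecutive non-blank '> ' lines are joined by newline
--     so original line breaks are kept.
--     """
--     out: list[str] = []
--     current: list[str] = []
--     for raw in lines:
--         s = raw.rstrip()
--         if s == "":
--             if current:
--                 out.append("\n".join(current))
--                 current = []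
--             continue
--         # Strip leading "> " or ">" marker
--         if s.startswith("> "):
--             current.append(s[2:])
--         elif s.startswith(">"):
--             current.append(s[1:])
--         else:
--             current.append(s)
--     if current:
--         out.append("\n".join(current))
--     return "\n\n".join(p for p in out if p)
-- ===== SOURCE B (Python) =====
-- def _strip_marker(s):
--     if s.startswith("> "):
--         return s[2:]
--     if s.startswith(">"):
--         return s[1:]
--     return s
--
--
-- def _join_paragraphs(lines: list[str]) -> str:
--     # Process pre-stripped lines as a stack: pop blank separators, collect each
--     # non-blank run wholesale, join it into a paragraph.
--     stack = [raw.rstrip() for raw in reversed(lines)]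
--     paragraphs = []
--     while stack:
--         s = stack.pop()
--         if s == "":
--             continue
--         run = [s]
--         while stack and stack[-1] != "":
--             run.append(stack.pop())
--         p = "\n".join(_strip_marker(x) for x in run)
--         if p:
--             paragraphs.append(p)
--     return "\n\n".join(paragraphs)
-- ===== Notes on version B (the rewrite author's own statement) =====
-- stated objective: alternative
-- what changed: Replaces A's running current/out accumulator fold with a pre-strip pass followed by explicit run-grouping (pop blank separators, collect each non-blank run, join it into a paragraph).
import Mathlib
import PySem

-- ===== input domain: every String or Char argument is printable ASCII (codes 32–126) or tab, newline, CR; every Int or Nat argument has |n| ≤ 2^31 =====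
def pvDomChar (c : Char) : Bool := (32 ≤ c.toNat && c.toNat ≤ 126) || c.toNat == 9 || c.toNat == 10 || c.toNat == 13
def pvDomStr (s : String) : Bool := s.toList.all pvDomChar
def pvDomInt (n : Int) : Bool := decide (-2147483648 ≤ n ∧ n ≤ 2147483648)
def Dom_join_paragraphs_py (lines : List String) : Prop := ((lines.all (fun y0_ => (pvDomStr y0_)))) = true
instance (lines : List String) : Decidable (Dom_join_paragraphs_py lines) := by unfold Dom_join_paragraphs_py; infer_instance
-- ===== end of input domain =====

-- B replaces A's running current/out accumulator with a pre-strip pass followed by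
-- explicit run-grouping; same cost, alternative decomposition.

-- ===== PORT A =====
-- loop body of A's `for raw in lines` over the state (out, current)
def apStep (acc : List String × List String) (raw : String) : List String × List String :=
  let s := PySem.Str.rstrip raw
  if s = "" then
    if acc.2 ≠ [] then (acc.1 ++ [PySem.Str.join "\n" acc.2], []) else acc
  else if PySem.Str.startswith s "> " then (acc.1, acc.2 ++ [PySem.Str.slice s (some 2) none])
  else if PySem.Str.startswith s ">" then (acc.1, acc.2 ++ [PySem.Str.slice s (some 1) none])
  else (acc.1, acc.2 ++ [s])

def join_paragraphs_py (lines : List String) : String :=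
  let st := lines.foldl apStep ([], [])
  let out := if st.2 ≠ [] then st.1 ++ [PySem.Str.join "\n" st.2] else st.1
  PySem.Str.join "\n\n" (out.filter (fun p => p ≠ ""))

-- ===== PORT B =====
def bStrip (s : String) : String :=
  if PySem.Str.startswith s "> " then PySem.Str.slice s (some 2) none
  else if PySem.Str.startswith s ">" then PySem.Str.slice s (some 1) none
  else s

-- the outer while loop of Source B over the stack of already-stripped lines:
-- skip a blank, otherwise collect the whole non-blank run and emit its paragraph if nonempty
def bGroups : List String → List String
  | [] => []
  | s :: rest =>
    if s = "" then bGroups rest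
    else
      let run := s :: rest.takeWhile (fun x => x ≠ "")
      let rest' := rest.dropWhile (fun x => x ≠ "")
      let p := PySem.Str.join "\n" (run.map bStrip)
      if p ≠ "" then p :: bGroups rest' else bGroups rest'
termination_by xs => xs.length
decreasing_by all_goals
  (have := List.length_dropWhile_le (fun x => decide (x ≠ "")) rest;
   simp only [List.length_cons] at this ⊢; omega)

def join_paragraphs_py_alt (lines : List String) : String :=
  PySem.Str.join "\n\n" (bGroups (lines.map PySem.Str.rstrip))

-- ===== PRECONDITION & SPEC =====
def Spec_join_paragraphs_py (lines : List String) (out : String) : Prop := out = join_paragraphs_py_alt lines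
instance (lines : List String) (out : String) : Decidable (Spec_join_paragraphs_py lines out) := by unfold Spec_join_paragraphs_py; infer_instance

-- ===== CLAIM (what is proved, stated in full; the proofs are below) =====
def Claim_equal_join_paragraphs_py : Prop := ∀ (lines : List String), Dom_join_paragraphs_py lines → Spec_join_paragraphs_py lines (join_paragraphs_py lines)

-- ===== LEMMAS AND PROOFS =====

-- A's step on an already-stripped line
def apStepS (acc : List String × List String) (s : String) : List String × List String :=
  if s = "" then
    if acc.2 ≠ [] then (acc.1 ++ [PySem.Str.join "\n" acc.2], []) else acc
  else (acc.1, acc.2 ++ [bStrip s])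

lemma apStep_eq (acc : List String × List String) (raw : String) :
    apStep acc raw = apStepS acc (PySem.Str.rstrip raw) := by
  simp only [apStep, apStepS, bStrip]
  split_ifs <;> rfl

-- what the final current list contributes after filtering
def emitP (cur : List String) : List String :=
  if cur = [] then [] else
    if PySem.Str.join "\n" cur ≠ "" then [PySem.Str.join "\n" cur] else []

-- the rest of A's computation (over stripped lines) as a function of the pending current list
def hFun : List String → List String → List String
  | cur, [] => emitP cur
  | cur, s :: rest =>
    if s = "" then emitP cur ++ hFun [] rest else hFun (cur ++ [bStrip s]) rest

-- A's trailing flush as a function of the final state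
def finA (st : List String × List String) : List String :=
  if st.2 ≠ [] then st.1 ++ [PySem.Str.join "\n" st.2] else st.1

lemma filter_singleton_join (cur : List String) :
    List.filter (fun p => p ≠ "") [PySem.Str.join "\n" cur]
    = if PySem.Str.join "\n" cur ≠ "" then [PySem.Str.join "\n" cur] else [] := by
  by_cases hj : PySem.Str.join "\n" cur = "" <;> simp [hj]

lemma foldl_apStepS (xs : List String) (out cur : List String) :
    (finA (xs.foldl apStepS (out, cur))).filter (fun p => p ≠ "")
    = out.filter (fun p => p ≠ "") ++ hFun cur xs := by
  induction xs generalizing out cur with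
  | nil =>
    simp only [List.foldl_nil, hFun]
    by_cases hc : cur = []
    · subst hc; simp [finA, emitP]
    · rw [show finA (out, cur) = out ++ [PySem.Str.join "\n" cur] from by simp [finA, hc],
        List.filter_append, filter_singleton_join]
      simp [emitP, hc]
  | cons s xs ih =>
    simp only [List.foldl_cons]
    by_cases hs : s = ""
    · subst hs
      rw [show hFun cur ("" :: xs) = emitP cur ++ hFun [] xs from by simp [hFun]]
      by_cases hc : cur = []
      · rw [show apStepS (out, cur) "" = (out, cur) from by simp [apStepS, hc], ih, hc]
        simp [emitP]
      · rw [show apStepS (out, cur) "" = (out ++ [PySem.Str.join "\n" cur], []) from by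
            simp [apStepS, hc],
          ih, List.filter_append, filter_singleton_join, List.append_assoc]
        congr 1
        simp [emitP, hc]
    · rw [show apStepS (out, cur) s = (out, cur ++ [bStrip s]) from by simp [apStepS, hs],
        show hFun cur (s :: xs) = hFun (cur ++ [bStrip s]) xs from by simp [hFun, hs], ih]

lemma hFun_nonempty (xs : List String) (cur : List String) (hc : cur ≠ []) :
    hFun cur xs
    = emitP (cur ++ (xs.takeWhile (fun x => x ≠ "")).map bStrip)
      ++ hFun [] (xs.dropWhile (fun x => x ≠ "")) := by
  induction xs generalizing cur with
  | nil => simp [hFun, emitP]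
  | cons s xs ih =>
    by_cases hs : s = ""
    · subst hs
      simp [hFun, List.takeWhile, List.dropWhile, emitP]
    · simp only [hFun, if_neg hs, List.takeWhile_cons, List.dropWhile_cons,
        decide_eq_true_eq]
      rw [ih (cur ++ [bStrip s]) (by simp)]
      simp [hs, List.append_assoc]

lemma hFun_nil_eq_bGroups (xs : List String) : hFun [] xs = bGroups xs := by
  induction xs using bGroups.induct with
  | case1 => simp [hFun, bGroups, emitP]
  | case2 rest ih =>
    simp only [hFun, bGroups]
    simpa [emitP] using ih
  | case3 s rest hs run rest' p _ ih =>
    simp only [hFun, if_neg hs, bGroups]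
    rw [hFun_nonempty _ _ (by simp)]
    rw [ih]
    simp only [emitP, List.nil_append, List.map_cons]
    rw [if_neg (by simp)]
    simp only [List.singleton_append]
    split_ifs <;> rfl
  | case4 s rest hs run rest' p _ ih =>
    simp only [hFun, if_neg hs, bGroups]
    rw [hFun_nonempty _ _ (by simp)]
    rw [ih]
    simp only [emitP, List.nil_append, List.map_cons]
    rw [if_neg (by simp)]
    simp only [List.singleton_append]
    split_ifs <;> rfl

-- ===== VERDICT (by name: the statement is the Claim_ definition above) =====
theorem join_paragraphs_py_spec : Claim_equal_join_paragraphs_py := by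
  intro lines _
  show PySem.Str.join "\n\n"
      ((finA (lines.foldl apStep ([], []))).filter (fun p => p ≠ ""))
    = PySem.Str.join "\n\n" (bGroups (lines.map PySem.Str.rstrip))
  have hf : apStep = fun acc raw => apStepS acc (PySem.Str.rstrip raw) :=
    funext fun acc => funext fun raw => apStep_eq acc raw
  rw [hf, ← List.foldl_map]
  have h2 := foldl_apStepS (lines.map PySem.Str.rstrip) [] []
  simp only [List.filter_nil, List.nil_append] at h2
  rw [h2, hFun_nil_eq_bGroups]
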